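-- pv_equiv track=rewrite | github.com/knights-lab/helix | helix/gtdb_taxonomy.py | strip_dangling_taxa
-- ===== SOURCE A (Python) =====
-- def strip_dangling_taxa(taxa_str: str) -> str:
--     taxa_l = taxa_str.split(";")
--     for ix in range(len(taxa_l) - 1, -1, -1):
--         taxa_str = taxa_l[ix]
--         if len(taxa_str) > 3 and not taxa_str.endswith("__"):
--             break
--     taxa_str = ";".join(taxa_l[:ix + 1])
--     return taxa_str
-- ===== SOURCE B (Python) =====
-- def strip_dangling_taxa(taxa_str: str) -> str:
--     taxa_l = taxa_str.split(";")
--     last = 0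
--     for i, t in enumerate(taxa_l):
--         if len(t) > 3 and not t.endswith("__"):
--             last = i
--     return ";".join(taxa_l[:last + 1])
-- ===== Notes on version B (the rewrite author's own statement) =====
-- stated objective: alternative
-- what changed: Replaces A's backward early-exit index scan (range(len-1,-1,-1) with break) by a single forward enumerate pass that maintains the index of the most recent qualifying token, preserving the behaviour that an all-dangling string keeps its first token.
import Mathlib
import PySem

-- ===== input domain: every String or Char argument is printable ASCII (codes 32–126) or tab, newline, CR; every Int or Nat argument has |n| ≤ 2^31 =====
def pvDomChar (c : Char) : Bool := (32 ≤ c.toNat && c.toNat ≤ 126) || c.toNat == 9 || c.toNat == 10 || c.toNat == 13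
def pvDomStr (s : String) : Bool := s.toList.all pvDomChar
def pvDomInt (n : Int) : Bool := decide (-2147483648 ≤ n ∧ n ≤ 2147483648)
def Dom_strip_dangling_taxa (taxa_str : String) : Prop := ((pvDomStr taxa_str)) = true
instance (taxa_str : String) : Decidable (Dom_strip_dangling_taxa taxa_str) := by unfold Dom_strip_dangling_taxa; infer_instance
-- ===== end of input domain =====

-- B replaces A's backward early-exit index scan by a forward enumerate pass keeping the last qualifying index (alternative decomposition, same cost).


-- ===== PORT A =====
-- A's loop 'for ix in range(len(taxa_l)-1, -1, -1): … break' over the descending index list;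
-- returns the break index, or 0 (the loop variable's final value) when the loop completes.
def stripA_loop (taxa_l : List String) : List Int → Int
  | [] => 0
  | ix :: rest =>
      let t := PySem.List.pyGetD taxa_l ix ""
      if 3 < PySem.Str.len t ∧ PySem.Str.endswith t "__" = false then ix
      else stripA_loop taxa_l rest

def strip_dangling_taxa (taxa_str : String) : String :=
  let taxa_l := (PySem.Str.split? taxa_str ";").getD []
  let ix := stripA_loop taxa_l (PySem.List.pyRange ((taxa_l.length : Int) - 1) (-1) (-1))
  PySem.Str.join ";" (PySem.List.slice taxa_l none (some (ix + 1)))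

-- ===== PORT B =====
def strip_dangling_taxa_alt (taxa_str : String) : String :=
  let taxa_l := (PySem.Str.split? taxa_str ";").getD []
  let last := (PySem.List.enumerate taxa_l 0).foldl
      (fun last p => if 3 < PySem.Str.len p.2 ∧ PySem.Str.endswith p.2 "__" = false then p.1 else last) 0
  PySem.Str.join ";" (PySem.List.slice taxa_l none (some (last + 1)))

-- ===== PRECONDITION & SPEC =====
def Spec_strip_dangling_taxa (taxa_str : String) (out : String) : Prop := out = strip_dangling_taxa_alt taxa_str
instance (taxa_str : String) (out : String) : Decidable (Spec_strip_dangling_taxa taxa_str out) := by unfold Spec_strip_dangling_taxa; infer_instance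

-- ===== CLAIM (what is proved, stated in full; the proofs are below) =====
def Claim_equal_strip_dangling_taxa : Prop := ∀ (taxa_str : String), Dom_strip_dangling_taxa taxa_str → Spec_strip_dangling_taxa taxa_str (strip_dangling_taxa taxa_str)

-- ===== LEMMAS AND PROOFS =====

-- A's loop never looks at an appended last element when all indices stay below l.length.
theorem stripA_loop_append (l : List String) (x : String) :
    ∀ r : List Int, (∀ i ∈ r, 0 ≤ i ∧ i < (l.length : Int)) →
      stripA_loop (l ++ [x]) r = stripA_loop l r := by
  intro r
  induction r with
  | nil => intro _; rfl
  | cons ix rest ih =>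
      intro h
      have hix := h ix (List.mem_cons_self)
      have hget : PySem.List.pyGetD (l ++ [x]) ix "" = PySem.List.pyGetD l ix "" := by
        rw [PySem.List.pyGetD_eq_getElem (l ++ [x]) "" hix.1 (by simp; omega),
            PySem.List.pyGetD_eq_getElem l "" hix.1 hix.2]
        exact List.getElem_append_left (by omega)
      simp only [stripA_loop, hget]
      split
      · rfl
      · exact ih (fun i hi => h i (List.mem_cons_of_mem _ hi))

-- The backward break scan equals the forward last-qualifying-index fold.
theorem loop_eq_fold (l : List String) :
    stripA_loop l (PySem.List.pyRange ((l.length : Int) - 1) (-1) (-1)) =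
    (PySem.List.enumerate l 0).foldl
      (fun last p => if 3 < PySem.Str.len p.2 ∧ PySem.Str.endswith p.2 "__" = false then p.1 else last) 0 := by
  induction l using List.reverseRecOn with
  | nil =>
      rw [PySem.List.pyRange_neg_one_eq_nil (by simp)]
      rfl
  | append_singleton l x ih =>
      have hn : ((l ++ [x]).length : Int) - 1 = (l.length : Int) := by simp
      rw [hn, PySem.List.pyRange_neg_one_cons (by omega)]
      have hget : PySem.List.pyGetD (l ++ [x]) (l.length : Int) "" = x := by
        rw [PySem.List.pyGetD_eq_getElem (l ++ [x]) "" (by omega) (by simp)]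
        simp
      rw [PySem.List.enumerate_append, List.foldl_append]
      simp only [stripA_loop, hget, PySem.List.enumerate, List.foldl]
      split
      · omega
      · rw [stripA_loop_append l x _ (fun i hi => by
            have := PySem.List.mem_pyRange_neg_one.mp hi; omega), ih]

-- ===== VERDICT (by name: the statement is the Claim_ definition above) =====
theorem strip_dangling_taxa_spec : Claim_equal_strip_dangling_taxa := by
  intro taxa_str _
  unfold Spec_strip_dangling_taxa strip_dangling_taxa strip_dangling_taxa_alt
  simp only [loop_eq_fold]
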